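-- pv_equiv track=rewrite | github.com/Atharva5120/Python_projects | 3/code3.py | fun3
-- ===== SOURCE A (Python) =====
-- def fun3(str):
--     # Creating variable and assigning them value as ZERO
--     letter_count= 0 ; spaces_count= 0 ;digit_count = 0
--
--     # For loop to split the elements and check them one by one
--     for i in str:
--
--         # Below if Condition calculates number of letters in a string using isalpha() function
--         if i.isalpha():
--             letter_count = letter_count + 1 # When the element is a character this will increment by 1
--
--         # Below if Condition calculates number of spaces in a string using isspace() function
--         elif i == ' ':
--             spaces_count = spaces_count + 1 # When the element in a string is a empty space this will increment by 1
--
--         # Below if Condition calculates number of digit in a string using isdigit() function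
--         elif i.isdigit():
--             digit_count = digit_count + 1 # When the element in a string is a digit this will increment by 1
--
--     # storing all the calculated values in a tuple
--     return(letter_count,spaces_count,digit_count) ## Returning dictionary 'count' calculating letters, spaces and digit
-- ===== SOURCE B (Python) =====
-- def fun3(str):
--     # Three independent passes instead of one branching loop; the predicates
--     # are mutually exclusive, so the counts match A's single-pass version.
--     letter_count = sum(1 for c in str if c.isalpha())
--     spaces_count = str.count(' ')
--     digit_count = sum(1 for c in str if c.isdigit())
--     return (letter_count, spaces_count, digit_count)
-- ===== Notes on version B (the rewrite author's own statement) =====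
-- stated objective: simpler
-- what changed: Replaces the single fold carrying a three-counter state with three independent whole-string counts (comprehension sums and str.count), relying on the mutual exclusivity of isalpha / ' ' / isdigit.
import Mathlib
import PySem

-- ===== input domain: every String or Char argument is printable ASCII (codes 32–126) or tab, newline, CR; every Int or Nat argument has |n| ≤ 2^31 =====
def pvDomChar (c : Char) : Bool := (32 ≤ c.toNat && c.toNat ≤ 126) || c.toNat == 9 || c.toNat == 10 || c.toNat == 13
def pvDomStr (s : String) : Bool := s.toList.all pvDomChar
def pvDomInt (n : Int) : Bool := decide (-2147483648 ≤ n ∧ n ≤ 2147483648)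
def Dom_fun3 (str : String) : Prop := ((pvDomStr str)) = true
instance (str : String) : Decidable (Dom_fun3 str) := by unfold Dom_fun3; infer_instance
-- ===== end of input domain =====

-- B replaces A's single branching fold by three independent whole-string counts (simpler decomposition).

-- ===== PORT A =====
-- literal port of A: one pass, three counters, if/elif/elif
def fun3 (str : String) : Int × Int × Int :=
  str.toList.foldl
    (fun (st : Int × Int × Int) i =>
      if PySem.Chars.isalpha i then (st.1 + 1, st.2.1, st.2.2)
      else if i == ' ' then (st.1, st.2.1 + 1, st.2.2)
      else if PySem.Chars.isdigit i then (st.1, st.2.1, st.2.2 + 1)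
      else st)
    (0, 0, 0)

-- ===== PORT B =====
-- Source B: sum(1 for c in str if c.isalpha()) ports as countP (a 0/1-sum IS List.countP);
-- str.count(' ') ports as List.count (exact for a single-character needle).
def fun3_alt (str : String) : Int × Int × Int :=
  ((str.toList.countP PySem.Chars.isalpha : Int),
   (str.toList.count ' ' : Int),
   (str.toList.countP PySem.Chars.isdigit : Int))

-- ===== PRECONDITION & SPEC =====
def Spec_fun3 (str : String) (out : Int × Int × Int) : Prop := out = fun3_alt str
instance (str : String) (out : Int × Int × Int) : Decidable (Spec_fun3 str out) := by unfold Spec_fun3; infer_instance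

-- ===== CLAIM (what is proved, stated in full; the proofs are below) =====
def Claim_equal_fun3 : Prop := ∀ (str : String), Dom_fun3 str → Spec_fun3 str (fun3 str)

-- ===== LEMMAS AND PROOFS =====

theorem pv_alpha_not_digit (c : Char) (h : PySem.Chars.isalpha c = true) :
    PySem.Chars.isdigit c = false := by
  simp only [PySem.Chars.isalpha, PySem.Chars.isupper, PySem.Chars.islower, PySem.Chars.isdigit,
    Bool.or_eq_true, Bool.and_eq_true, decide_eq_true_eq, Char.le_def,
    UInt32.le_iff_toNat_le, Bool.and_eq_false_iff, decide_eq_false_iff_not,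
    show ('A').val.toNat = 65 from rfl, show ('Z').val.toNat = 90 from rfl,
    show ('a').val.toNat = 97 from rfl, show ('z').val.toNat = 122 from rfl,
    show ('0').val.toNat = 48 from rfl, show ('9').val.toNat = 57 from rfl] at *
  rcases h with ⟨h1, h2⟩ | ⟨h1, h2⟩ <;> omega

theorem pv_alpha_not_space (c : Char) (h : PySem.Chars.isalpha c = true) : (c == ' ') = false := by
  rcases Bool.eq_false_or_eq_true (c == ' ') with h' | h'
  · have hc : c = ' ' := beq_iff_eq.mp h'
    subst hc; exact absurd h (by decide)
  · exact h' 

-- invariant of A's fold: starting from any accumulator it adds the three independent counts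
theorem pv_fold_inv (l : List Char) (a b c : Int) :
    l.foldl
      (fun (st : Int × Int × Int) i =>
        if PySem.Chars.isalpha i then (st.1 + 1, st.2.1, st.2.2)
        else if i == ' ' then (st.1, st.2.1 + 1, st.2.2)
        else if PySem.Chars.isdigit i then (st.1, st.2.1, st.2.2 + 1)
        else st)
      (a, b, c)
    = (a + (l.countP PySem.Chars.isalpha : Int),
       b + (l.count ' ' : Int),
       c + (l.countP PySem.Chars.isdigit : Int)) := by
  induction l generalizing a b c with
  | nil => simp
  | cons x xs ih =>
    simp only [List.foldl_cons, List.countP_cons, List.count_cons]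
    by_cases hA : PySem.Chars.isalpha x = true
    · rw [if_pos hA, ih]
      have hD := pv_alpha_not_digit x hA
      have hS := pv_alpha_not_space x hA
      simp [hA, hD, hS]
      omega
    · rw [if_neg (by simp [hA])]
      by_cases hS : (x == ' ') = true
      · have hx : x = ' ' := beq_iff_eq.mp hS
        subst hx
        rw [if_pos (by decide), ih]
        simp
        omega
      · rw [if_neg hS]
        by_cases hD : PySem.Chars.isdigit x = true
        · rw [if_pos hD, ih]
          simp [hA, hD, eq_false hS]
          omega
        · rw [if_neg hD, ih]
          simp [hA, hD, eq_false hS]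

-- ===== VERDICT (by name: the statement is the Claim_ definition above) =====
theorem fun3_spec : Claim_equal_fun3 := by
  intro str _
  unfold Spec_fun3 fun3 fun3_alt
  rw [pv_fold_inv]
  simp
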